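-- pv_equiv track=rewrite | github.com/2193824842-spec/ai-pulse | scripts/retranslate_articles.py | split_by_h2
-- ===== SOURCE A (Python) =====
-- def split_by_h2(html_content):
--     """按 h2 标签分割HTML"""
--     sections = []
--     lines = html_content.split('\n')
--     current_section = []
--
--     for line in lines:
--         if '<h2>' in line and current_section:
--             sections.append('\n'.join(current_section))
--             current_section = [line]
--         else:
--             current_section.append(line)
--
--     if current_section:
--         sections.append('\n'.join(current_section))
--
--     return sections
-- ===== SOURCE B (Python) =====
-- def split_by_h2(html_content):
--     """按 h2 标签分割HTML"""
--     lines = html_content.split('\n')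
--     boundaries = [i for i, line in enumerate(lines) if '<h2>' in line and i > 0]
--     cuts = [0] + boundaries + [len(lines)]
--     return ['\n'.join(lines[start:end]) for start, end in zip(cuts, cuts[1:])]
-- ===== Notes on version B (the rewrite author's own statement) =====
-- stated objective: alternative
-- what changed: B first collects the cut indices (lines containing '<h2>' at index > 0), then builds each section by slicing the line list once between consecutive cuts, instead of A's accumulate-and-flush loop with mutable section state.
import Mathlib
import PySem

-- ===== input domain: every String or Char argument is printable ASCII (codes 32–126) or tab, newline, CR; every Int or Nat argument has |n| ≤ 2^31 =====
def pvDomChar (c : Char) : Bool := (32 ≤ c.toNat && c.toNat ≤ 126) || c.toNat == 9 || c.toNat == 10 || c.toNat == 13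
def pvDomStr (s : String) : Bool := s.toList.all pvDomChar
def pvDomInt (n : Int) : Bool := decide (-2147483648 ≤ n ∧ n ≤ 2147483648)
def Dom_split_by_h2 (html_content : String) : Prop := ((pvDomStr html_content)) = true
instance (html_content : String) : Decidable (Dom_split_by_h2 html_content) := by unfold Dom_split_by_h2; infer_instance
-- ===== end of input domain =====

-- B computes the cut indices first (lines containing "<h2>", index > 0) and slices once,
-- instead of A's accumulate-and-flush loop; same return value on every input (objective: alternative decomposition).

-- ===== PORT A =====
-- the separator "\n" is non-empty, so Python's split never raises: split? is always `some`
-- and the `.getD []` default is never used.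
def split_by_h2 (html_content : String) : List String :=
  let lines := (PySem.Str.split? html_content "\n").getD []
  let st := lines.foldl
    (fun (st : List String × List String) line =>
      if PySem.Str.isIn "<h2>" line && !st.2.isEmpty then
        (st.1 ++ [PySem.Str.join "\n" st.2], [line])
      else
        (st.1, st.2 ++ [line])) ([], [])
  if !st.2.isEmpty then st.1 ++ [PySem.Str.join "\n" st.2] else st.1

-- ===== PORT B =====
def split_by_h2_alt (html_content : String) : List String :=
  let lines := (PySem.Str.split? html_content "\n").getD []
  let boundaries := ((PySem.List.enumerate lines).filter
      (fun q => PySem.Str.isIn "<h2>" q.2 && decide ((0:Int) < q.1))).map Prod.fst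
  let cuts := [(0:Int)] ++ boundaries ++ [(lines.length : Int)]
  (cuts.zip cuts.tail).map (fun q =>
    PySem.Str.join "\n" (PySem.List.slice lines (some q.1) (some q.2)))

-- ===== PRECONDITION & SPEC =====
def Spec_split_by_h2 (html_content : String) (out : List String) : Prop := out = split_by_h2_alt html_content
instance (html_content : String) (out : List String) : Decidable (Spec_split_by_h2 html_content out) := by unfold Spec_split_by_h2; infer_instance

-- ===== CLAIM (what is proved, stated in full; the proofs are below) =====
def Claim_equal_split_by_h2 : Prop := ∀ (html_content : String), Dom_split_by_h2 html_content → Spec_split_by_h2 html_content (split_by_h2 html_content)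

-- ===== LEMMAS AND PROOFS =====

-- Python's s.split(sep) always has at least one piece
theorem pvGo_ne_nil (sep : List Char) : ∀ (fuel : Nat) (l cur : List Char) (acc : List (List Char)),
    PySem.Chars.splitOn.go sep fuel l cur acc ≠ [] := by
  intro fuel
  induction fuel with
  | zero => intro l cur acc; simp [PySem.Chars.splitOn.go]
  | succ n ih =>
    intro l cur acc
    cases l with
    | nil => simp [PySem.Chars.splitOn.go]
    | cons c rest =>
      rw [PySem.Chars.splitOn.go]
      split <;> apply ih

theorem pvSplitOn_ne_nil (s sep : List Char) : PySem.Chars.splitOn s sep ≠ [] :=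
  pvGo_ne_nil sep _ s [] []

-- A's loop body, named so the lemmas can speak about it (definitionally the lambda in the port)
def pvStepA (st : List String × List String) (line : String) : List String × List String :=
  if PySem.Str.isIn "<h2>" line && !st.2.isEmpty then
    (st.1 ++ [PySem.Str.join "\n" st.2], [line])
  else
    (st.1, st.2 ++ [line])

-- the common intermediate: the chunk decomposition (a new chunk starts at each later "<h2>" line)
def pvChunks (cur : List String) : List String → List (List String)
  | [] => [cur]
  | l :: ls => if PySem.Str.isIn "<h2>" l then cur :: pvChunks [l] ls
               else pvChunks (cur ++ [l]) ls

-- indices (counting from s) of the lines containing "<h2>"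
def pvIdxs : List String → Nat → List Nat
  | [], _ => []
  | l :: ls, s => if PySem.Str.isIn "<h2>" l then s :: pvIdxs ls (s+1) else pvIdxs ls (s+1)

-- consecutive pairs of a cut list
def pvPairs (cs : List Nat) : List (Nat × Nat) := cs.zip cs.tail

-- ---- A's loop produces the chunks ----
theorem pvFoldA : ∀ (ls secs cur : List String), cur ≠ [] →
    (ls.foldl pvStepA (secs, cur)).2 ≠ [] ∧
    (ls.foldl pvStepA (secs, cur)).1
        ++ [PySem.Str.join "\n" (ls.foldl pvStepA (secs, cur)).2]
      = secs ++ (pvChunks cur ls).map (PySem.Str.join "\n") := by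
  intro ls
  induction ls with
  | nil => intro secs cur h; simpa [pvChunks] using h
  | cons l ls ih =>
    intro secs cur h
    by_cases hp : PySem.Chars.isIn ['<', 'h', '2', '>'] l.toList = true
    · have hstep : pvStepA (secs, cur) l = (secs ++ [PySem.Str.join "\n" cur], [l]) := by
        simp [pvStepA, hp, h]
      have hch : pvChunks cur (l :: ls) = cur :: pvChunks [l] ls := by
        simp [pvChunks, hp]
      simp only [List.foldl_cons, hstep, hch]
      rcases ih (secs ++ [PySem.Str.join "\n" cur]) [l] (by simp) with ⟨h1, h2⟩
      exact ⟨h1, by simp [h2, List.map_cons]⟩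
    · have hstep : pvStepA (secs, cur) l = (secs, cur ++ [l]) := by
        simp [pvStepA, hp]
      have hch : pvChunks cur (l :: ls) = pvChunks (cur ++ [l]) ls := by
        simp [pvChunks, hp]
      simp only [List.foldl_cons, hstep, hch]
      exact ih secs (cur ++ [l]) (by simp)

-- ---- B's boundary comprehension is pvIdxs ----
theorem pvEnum : ∀ (ls : List String) (s : Nat), 1 ≤ s →
    ((PySem.List.enumerate ls (s : Int)).filter
        (fun q => PySem.Str.isIn "<h2>" q.2 && decide ((0:Int) < q.1))).map Prod.fst
      = List.map (fun n : Nat => (n : Int)) (pvIdxs ls s) := by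
  intro ls
  induction ls with
  | nil => intro s hs; simp [PySem.List.enumerate_nil, pvIdxs]
  | cons l ls ih =>
    intro s hs
    have hpos : decide ((0:Int) < (s:Int)) = true := by
      simp only [decide_eq_true_eq]; exact_mod_cast hs
    have hcast : (s : Int) + 1 = ((s + 1 : Nat) : Int) := by push_cast; ring
    rw [PySem.List.enumerate_cons, List.filter_cons, hcast]
    by_cases hp : PySem.Str.isIn "<h2>" l = true
    · rw [if_pos (by rw [hp, hpos]; rfl)]
      rw [List.map_cons, ih (s+1) (by omega)]
      simp only [pvIdxs, hp, if_true]
      rw [List.map_cons]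
    · have hp' : PySem.Str.isIn "<h2>" l = false := by
        cases hval : PySem.Str.isIn "<h2>" l with
        | true => exact absurd hval hp
        | false => rfl
      rw [if_neg (by rw [hp']; simp)]
      rw [ih (s+1) (by omega)]
      simp only [pvIdxs, hp', Bool.false_eq_true, if_false]

theorem pvIdxs_shift : ∀ (ls : List String) (a k : Nat),
    pvIdxs ls (a + k) = (pvIdxs ls a).map (· + k) := by
  intro ls
  induction ls with
  | nil => intro a k; simp [pvIdxs]
  | cons l ls ih =>
    intro a k
    by_cases hp : PySem.Chars.isIn ['<', 'h', '2', '>'] l.toList = true <;>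
      simp [pvIdxs, hp, ← ih (a+1) k, Nat.add_right_comm]

-- ---- slicing arithmetic ----
theorem pvTakeLeft (pre M : List String) : (pre ++ M).take pre.length = pre :=
  List.take_left

theorem pvDropAdd (pre M : List String) (a : Nat) :
    (pre ++ M).drop (a + pre.length) = M.drop a := by
  rw [List.drop_append]
  simp [List.drop_eq_nil_of_le]

theorem pvSliceShift (pre M : List String) (a b : Nat) :
    PySem.List.slice (pre ++ M) (some ((a + pre.length : Nat) : Int)) (some ((b + pre.length : Nat) : Int))
      = PySem.List.slice M (some (a : Int)) (some (b : Int)) := by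
  rw [PySem.List.slice_natCast, PySem.List.slice_natCast, Nat.add_sub_add_right, pvDropAdd]

theorem pvSliceHead (pre M : List String) :
    PySem.List.slice (pre ++ M) (some ((0 : Nat) : Int)) (some ((pre.length : Nat) : Int)) = pre := by
  rw [PySem.List.slice_natCast]
  simp only [Nat.sub_zero, List.drop_zero]
  exact pvTakeLeft pre M

-- consecutive pairs commute with mapping an injection over the cut list
theorem pvZipMapTail {β : Type} (f : Nat → β) : ∀ (cs : List Nat),
    (cs.map f).zip (cs.map f).tail = (cs.zip cs.tail).map (fun q => (f q.1, f q.2)) := by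
  intro cs
  induction cs with
  | nil => rfl
  | cons c cs ih =>
    cases cs with
    | nil => rfl
    | cons d ds =>
      simp only [List.map_cons, List.tail_cons, List.zip_cons_cons] at ih ⊢
      rw [ih]

theorem pvPairsMap (cs : List Nat) (k : Nat) :
    pvPairs (cs.map (· + k)) = (pvPairs cs).map (fun q => (q.1 + k, q.2 + k)) := by
  unfold pvPairs
  exact pvZipMapTail (· + k) cs

theorem pvPairs_cons (a b : Nat) (cs : List Nat) :
    pvPairs (a :: b :: cs) = (a, b) :: pvPairs (b :: cs) := rfl

-- ---- B's slicing at the cuts also produces the chunks ----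
theorem pvSL : ∀ (ls pre : List String),
    (pvPairs (0 :: (pvIdxs ls pre.length ++ [pre.length + ls.length]))).map
      (fun q => PySem.Str.join "\n"
        (PySem.List.slice (pre ++ ls) (some (q.1 : Int)) (some (q.2 : Int))))
    = (pvChunks pre ls).map (PySem.Str.join "\n") := by
  intro ls
  induction ls with
  | nil =>
    intro pre
    have h0 : pvPairs (0 :: (pvIdxs [] pre.length ++ [pre.length + ([] : List String).length]))
        = [(0, pre.length)] := by simp [pvIdxs, pvPairs]
    rw [h0]
    simp only [List.map_cons, List.map_nil, pvChunks]
    rw [pvSliceHead pre []]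
  | cons l ls ih =>
    intro pre
    by_cases hp : PySem.Str.isIn "<h2>" l = true
    · have hidx : pvIdxs (l :: ls) pre.length = pre.length :: pvIdxs ls (pre.length + 1) := by
        simp only [pvIdxs, hp, if_true]
      have hch : pvChunks pre (l :: ls) = pre :: pvChunks [l] ls := by
        simp only [pvChunks, hp, if_true]
      rw [hidx, hch]
      have hshift : pre.length :: (pvIdxs ls (pre.length + 1) ++ [pre.length + (l :: ls).length])
          = (0 :: (pvIdxs ls 1 ++ [1 + ls.length])).map (· + pre.length) := by
        simp only [List.map_cons, List.map_append, List.map_nil, Nat.zero_add, List.length_cons]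
        rw [← pvIdxs_shift ls 1 pre.length, Nat.add_comm 1 pre.length,
          show pre.length + (ls.length + 1) = 1 + ls.length + pre.length by omega]
      have hcons : (0 :: (pre.length :: pvIdxs ls (pre.length + 1) ++ [pre.length + (l :: ls).length]))
          = 0 :: pre.length :: (pvIdxs ls (pre.length + 1) ++ [pre.length + (l :: ls).length]) := rfl
      rw [hcons, pvPairs_cons, List.map_cons, pvSliceHead pre (l :: ls), hshift,
        pvPairsMap, List.map_map, List.map_cons]
      congr 1
      have hfun : ((fun q => PySem.Str.join "\n"
            (PySem.List.slice (pre ++ l :: ls) (some ((q.1 : Nat) : Int)) (some ((q.2 : Nat) : Int))))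
          ∘ (fun q => (q.1 + pre.length, q.2 + pre.length)))
          = (fun q : Nat × Nat => PySem.Str.join "\n"
            (PySem.List.slice (l :: ls) (some (q.1 : Int)) (some (q.2 : Int)))) := by
        funext q
        show PySem.Str.join "\n" (PySem.List.slice (pre ++ l :: ls)
            (some ((q.1 + pre.length : Nat) : Int)) (some ((q.2 + pre.length : Nat) : Int))) = _
        rw [pvSliceShift pre (l :: ls) q.1 q.2]
      rw [hfun]
      have h1 := ih [l]
      simp only [List.length_cons, List.length_nil, Nat.zero_add, List.singleton_append] at h1
      exact h1
    · have hp' : PySem.Str.isIn "<h2>" l = false := by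
        cases hval : PySem.Str.isIn "<h2>" l with
        | true => exact absurd hval hp
        | false => rfl
      have hidx : pvIdxs (l :: ls) pre.length = pvIdxs ls ((pre ++ [l]).length) := by
        simp only [pvIdxs, hp', Bool.false_eq_true, if_false]
        simp
      have hch : pvChunks pre (l :: ls) = pvChunks (pre ++ [l]) ls := by
        simp only [pvChunks, hp', Bool.false_eq_true, if_false]
      have hlen : pre.length + (l :: ls).length = (pre ++ [l]).length + ls.length := by
        simp; omega
      have happ : pre ++ l :: ls = (pre ++ [l]) ++ ls := by simp
      rw [hidx, hch, hlen, happ]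
      exact ih (pre ++ [l])

-- ===== VERDICT (by name: the statement is the Claim_ definition above) =====
theorem split_by_h2_spec : Claim_equal_split_by_h2 := by
  unfold Claim_equal_split_by_h2
  intro html _
  unfold Spec_split_by_h2
  -- both programs read the same non-empty line list
  have hne : (PySem.Str.split? html "\n").getD [] ≠ [] := by
    simp only [PySem.Str.split?, PySem.Chars.split?]
    simp [pvSplitOn_ne_nil]
  obtain ⟨l0, ls, hl⟩ := List.exists_cons_of_ne_nil hne
  -- A's side
  have hA : split_by_h2 html = (pvChunks [l0] ls).map (PySem.Str.join "\n") := by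
    show (let lines := (PySem.Str.split? html "\n").getD []
          let st := lines.foldl pvStepA ([], [])
          if !st.2.isEmpty then st.1 ++ [PySem.Str.join "\n" st.2] else st.1)
        = (pvChunks [l0] ls).map (PySem.Str.join "\n")
    simp only [hl, List.foldl_cons]
    have hstep0 : pvStepA ([], []) l0 = ([], [l0]) := by simp [pvStepA]
    rw [hstep0]
    rcases pvFoldA ls [] [l0] (by simp) with ⟨h1, h2⟩
    rw [if_pos (by simp [h1])]
    simpa using h2
  -- B's side
  have hB : split_by_h2_alt html = (pvChunks [l0] ls).map (PySem.Str.join "\n") := by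
    show (let lines := (PySem.Str.split? html "\n").getD []
          let boundaries := ((PySem.List.enumerate lines).filter
              (fun q => PySem.Str.isIn "<h2>" q.2 && decide ((0:Int) < q.1))).map Prod.fst
          let cuts := [(0:Int)] ++ boundaries ++ [(lines.length : Int)]
          (cuts.zip cuts.tail).map (fun q =>
            PySem.Str.join "\n" (PySem.List.slice lines (some q.1) (some q.2))))
        = (pvChunks [l0] ls).map (PySem.Str.join "\n")
    simp only [hl]
    have hb : ((PySem.List.enumerate (l0 :: ls) 0).filter
          (fun q => PySem.Str.isIn "<h2>" q.2 && decide ((0:Int) < q.1))).map Prod.fst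
        = List.map (fun n : Nat => (n : Int)) (pvIdxs ls 1) := by
      rw [PySem.List.enumerate_cons, List.filter_cons]
      rw [if_neg (by simp)]
      have h1 := pvEnum ls 1 (le_refl 1)
      simpa using h1
    rw [hb]
    have hcuts : [(0:Int)] ++ List.map (fun n : Nat => (n : Int)) (pvIdxs ls 1)
          ++ [((l0 :: ls).length : Int)]
        = (0 :: (pvIdxs ls 1 ++ [1 + ls.length])).map (fun n : Nat => (n : Int)) := by
      simp [Nat.add_comm]
    rw [hcuts, pvZipMapTail (fun n : Nat => (n : Int))]
    rw [List.map_map]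
    have h1 := pvSL ls [l0]
    simp only [List.length_cons, List.length_nil, Nat.zero_add, List.singleton_append] at h1
    rw [← h1]
    rfl
  rw [hA, hB]
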